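-- pv_equiv track=rewrite | github.com/StonyBrookNLP/action-anticipation-lmtovideo | teacher/code/recipe_processing.py | tuple_from_IE_res_v3
-- ===== SOURCE A (Python) =====
-- from typing import List
-- from typing import List
--
-- def tuple_from_IE_res_v3(tokens: List[str], tags: List[str]) -> str:
--     """
--     Converts a list of model outputs (i.e., a list of lists of bio tags, each
--     pertaining to a single word), returns an inline bracket representation of
--     the prediction.
--     """
--     frame = []
--     chunk = []
--     verb = []
--     obj = []
--
--     for (token, tag) in zip(tokens, tags):
--         if (tag == 'I-V') or (tag == 'I-ARG1')  :
--             chunk.append(token)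
--         else:
--             if chunk:
--                 if chunk[0].startswith('V: '):
--                     verb.append(" ".join(chunk).replace('V: ', ''))
--                 else:
--                     obj.append(" ".join(chunk).replace('ARG1: ', ''))
--
--                 frame.append("[" + " ".join(chunk) + "]")
--                 chunk = []
--
--             if (tag == 'B-V') or (tag == 'B-ARG1'):
--                 chunk.append(tag[2:] + ": " + token)
--
--     if chunk:
--         frame.append("[" + " ".join(chunk) + "]")
--     return " ".join(frame), (verb, obj)
-- ===== SOURCE B (Python) =====
-- from typing import List
--
--
-- def tuple_from_IE_res_v3(tokens: List[str], tags: List[str]) -> str: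
--     # Pass 1: segment the tagged tokens into chunks, remembering whether each
--     # chunk was closed inside the loop or left dangling at the end.
--     chunks = []  # list of (list_of_strings, closed_flag)
--     cur = None
--     for token, tag in zip(tokens, tags):
--         if tag in ('I-V', 'I-ARG1'):
--             if cur is None:
--                 cur = [token]
--             else:
--                 cur.append(token)
--         else:
--             if cur is not None:
--                 chunks.append((cur, True))
--                 cur = None
--             if tag in ('B-V', 'B-ARG1'):
--                 cur = [tag[2:] + ": " + token]
--     if cur is not None:
--         chunks.append((cur, False))
--
--     # Pass 2: assemble the bracket string from all chunks, and the verb/obj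
--     # lists from the closed chunks only.
--     frame = " ".join("[" + " ".join(c) + "]" for c, _ in chunks)
--     verb = []
--     obj = []
--     for c, closed in chunks:
--         if closed:
--             s = " ".join(c)
--             if c[0].startswith('V: '):
--                 verb.append(s.replace('V: ', ''))
--             else:
--                 obj.append(s.replace('ARG1: ', ''))
--     return frame, (verb, obj)
-- ===== Notes on version B (the rewrite author's own statement) =====
-- stated objective: alternative
-- what changed: B replaces A's single loop with interleaved frame/verb/obj bookkeeping by a two-pass decomposition: pass 1 segments (token,tag) pairs into chunks with a closed/dangling flag, pass 2 builds the bracket string from all chunks and the verb/obj lists from the closed chunks only.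
import Mathlib
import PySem

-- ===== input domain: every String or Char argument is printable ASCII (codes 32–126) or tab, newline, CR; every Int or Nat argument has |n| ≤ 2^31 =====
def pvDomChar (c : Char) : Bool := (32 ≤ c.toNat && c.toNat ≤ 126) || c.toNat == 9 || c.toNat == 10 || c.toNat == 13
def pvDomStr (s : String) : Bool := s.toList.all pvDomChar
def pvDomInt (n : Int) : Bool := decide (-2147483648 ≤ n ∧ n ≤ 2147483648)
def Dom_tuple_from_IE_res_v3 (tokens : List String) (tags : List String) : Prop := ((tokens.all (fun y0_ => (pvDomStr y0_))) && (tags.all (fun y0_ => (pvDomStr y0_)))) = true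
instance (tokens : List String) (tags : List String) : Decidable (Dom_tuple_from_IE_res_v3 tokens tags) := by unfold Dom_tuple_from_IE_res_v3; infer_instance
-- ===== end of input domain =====

-- B segments the tagged tokens into flagged chunks in one pass and assembles
-- frame/verb/obj from the chunk list in a second pass (same cost, different
-- decomposition); equivalence of the RETURN values is proved below.

-- ===== PORT A =====
-- one step of A's loop over state (frame, chunk, verb, obj)
def aStep (st : List String × List String × List String × List String)
    (p : String × String) : List String × List String × List String × List String :=
  match st, p with
  | (frame, chunk, verb, obj), (token, tag) =>
    if tag = "I-V" ∨ tag = "I-ARG1" then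
      (frame, chunk ++ [token], verb, obj)
    else
      match chunk with
      | [] =>
        if tag = "B-V" ∨ tag = "B-ARG1" then
          (frame, [PySem.Str.slice tag (some 2) none ++ ": " ++ token], verb, obj)
        else
          (frame, [], verb, obj)
      | c0 :: _ =>
        let joined := PySem.Str.join " " chunk
        let verb' := if PySem.Str.startswith c0 "V: " then
            verb ++ [PySem.Str.replace joined "V: " ""] else verb
        let obj' := if PySem.Str.startswith c0 "V: " then obj
            else obj ++ [PySem.Str.replace joined "ARG1: " ""]
        let frame' := frame ++ ["[" ++ joined ++ "]"]
        if tag = "B-V" ∨ tag = "B-ARG1" then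
          (frame', [PySem.Str.slice tag (some 2) none ++ ": " ++ token], verb', obj')
        else
          (frame', [], verb', obj')

def tuple_from_IE_res_v3 (tokens : List String) (tags : List String) :
    String × (List String × List String) :=
  match (tokens.zip tags).foldl aStep ([], [], [], []) with
  | (frame, chunk, verb, obj) =>
    let frame := if chunk ≠ [] then frame ++ ["[" ++ PySem.Str.join " " chunk ++ "]"] else frame
    (PySem.Str.join " " frame, (verb, obj))

-- ===== PORT B =====
-- pass 1: one step of the chunk-segmenting loop over state (chunks, cur)
def bStep (st : List (List String × Bool) × Option (List String)) (p : String × String) :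
    List (List String × Bool) × Option (List String) :=
  match st, p with
  | (chunks, cur), (token, tag) =>
    if tag = "I-V" ∨ tag = "I-ARG1" then
      match cur with
      | none => (chunks, some [token])
      | some c => (chunks, some (c ++ [token]))
    else
      let chunks := match cur with
        | none => chunks
        | some c => chunks ++ [(c, true)]
      if tag = "B-V" ∨ tag = "B-ARG1" then
        (chunks, some [PySem.Str.slice tag (some 2) none ++ ": " ++ token])
      else
        (chunks, none)

def bracketChunk (c : List String) : String := "[" ++ PySem.Str.join " " c ++ "]"

-- pass 2 step: classify a closed chunk into verb/obj.
-- Source B reads c[0]; closed chunks are never empty, headD "" is c[0] there.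
def classifyStep (acc : List String × List String) (cb : List String × Bool) :
    List String × List String :=
  match cb with
  | (c, closed) =>
    if closed then
      let s := PySem.Str.join " " c
      if PySem.Str.startswith (c.headD "") "V: " then
        (acc.1 ++ [PySem.Str.replace s "V: " ""], acc.2)
      else
        (acc.1, acc.2 ++ [PySem.Str.replace s "ARG1: " ""])
    else acc

def tuple_from_IE_res_v3_alt (tokens : List String) (tags : List String) :
    String × (List String × List String) :=
  match (tokens.zip tags).foldl bStep ([], none) with
  | (chunks, cur) =>
    let chunks := chunks ++ (match cur with | none => [] | some c => [(c, false)])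
    let frame := PySem.Str.join " " (chunks.map (fun cb => bracketChunk cb.1))
    (frame, chunks.foldl classifyStep ([], []))

-- ===== PRECONDITION & SPEC =====
def Spec_tuple_from_IE_res_v3 (tokens : List String) (tags : List String) (out : String × (List String × List String)) : Prop := out = tuple_from_IE_res_v3_alt tokens tags
instance (tokens : List String) (tags : List String) (out : String × (List String × List String)) : Decidable (Spec_tuple_from_IE_res_v3 tokens tags out) := by unfold Spec_tuple_from_IE_res_v3; infer_instance

-- ===== CLAIM (what is proved, stated in full; the proofs are below) =====
def Claim_equal_tuple_from_IE_res_v3 : Prop := ∀ (tokens : List String) (tags : List String), Dom_tuple_from_IE_res_v3 tokens tags → Spec_tuple_from_IE_res_v3 tokens tags (tuple_from_IE_res_v3 tokens tags)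

-- ===== LEMMAS AND PROOFS =====

-- abbreviations used only inside the main_loop proof
def verbUpd (c0 : String) (cr : List String) (v : List String) : List String :=
  v ++ [PySem.Str.replace (PySem.Str.join " " (c0 :: cr)) "V: " ""]
def objUpd (c0 : String) (cr : List String) (o : List String) : List String :=
  o ++ [PySem.Str.replace (PySem.Str.join " " (c0 :: cr)) "ARG1: " ""]

-- step-reduction lemmas for the two loop bodies
theorem aStep_I (frame chunk verb obj : List String) (token tag : String)
    (hI : tag = "I-V" ∨ tag = "I-ARG1") :
    aStep (frame, chunk, verb, obj) (token, tag) = (frame, chunk ++ [token], verb, obj) := by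
  simp only [aStep]; rw [if_pos hI]

theorem aStep_nil (frame verb obj : List String) (token tag : String)
    (hI : ¬(tag = "I-V" ∨ tag = "I-ARG1")) :
    aStep (frame, [], verb, obj) (token, tag) =
      (frame,
       (if tag = "B-V" ∨ tag = "B-ARG1" then
          [PySem.Str.slice tag (some 2) none ++ ": " ++ token] else []),
       verb, obj) := by
  simp only [aStep]; rw [if_neg hI]; split_ifs <;> rfl

theorem aStep_cons (frame verb obj : List String) (c0 : String) (cr : List String)
    (token tag : String) (hI : ¬(tag = "I-V" ∨ tag = "I-ARG1")) :
    aStep (frame, c0 :: cr, verb, obj) (token, tag) =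
      (frame ++ ["[" ++ PySem.Str.join " " (c0 :: cr) ++ "]"],
       (if tag = "B-V" ∨ tag = "B-ARG1" then
          [PySem.Str.slice tag (some 2) none ++ ": " ++ token] else []),
       (if PySem.Str.startswith c0 "V: " = true then
          verb ++ [PySem.Str.replace (PySem.Str.join " " (c0 :: cr)) "V: " ""] else verb),
       (if PySem.Str.startswith c0 "V: " = true then obj
        else obj ++ [PySem.Str.replace (PySem.Str.join " " (c0 :: cr)) "ARG1: " ""])) := by
  simp only [aStep]; rw [if_neg hI]; split_ifs <;> rfl

theorem bStep_I (chunks : List (List String × Bool)) (cur : Option (List String))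
    (token tag : String) (hI : tag = "I-V" ∨ tag = "I-ARG1") :
    bStep (chunks, cur) (token, tag) = (chunks, some (cur.getD [] ++ [token])) := by
  cases cur <;> · simp only [bStep]; rw [if_pos hI]; simp

theorem bStep_else (chunks : List (List String × Bool)) (cur : Option (List String))
    (token tag : String) (hI : ¬(tag = "I-V" ∨ tag = "I-ARG1")) :
    bStep (chunks, cur) (token, tag) =
      (chunks ++ (match cur with | none => [] | some c => [(c, true)]),
       if tag = "B-V" ∨ tag = "B-ARG1" then
         some [PySem.Str.slice tag (some 2) none ++ ": " ++ token] else none) := by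
  cases cur <;> · simp only [bStep]; rw [if_neg hI]; split_ifs <;> simp

-- bStep only ever appends to the chunk list
theorem bStep_shift (l : List (String × String)) :
    ∀ (chunks : List (List String × Bool)) (cur : Option (List String)),
      l.foldl bStep (chunks, cur) =
        (chunks ++ (l.foldl bStep ([], cur)).1, (l.foldl bStep ([], cur)).2) := by
  induction l with
  | nil => intro chunks cur; simp
  | cons p rest ih =>
    intro chunks cur
    obtain ⟨token, tag⟩ := p
    simp only [List.foldl_cons]
    by_cases hI : tag = "I-V" ∨ tag = "I-ARG1"
    · rw [bStep_I chunks cur token tag hI, bStep_I [] cur token tag hI]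
      exact ih _ _
    · rw [bStep_else chunks cur token tag hI, bStep_else [] cur token tag hI,
        List.nil_append]
      rw [ih, ih ((match cur with | none => [] | some c => [(c, true)] :
        List (List String × Bool)))]
      simp

-- classifyStep only ever appends to the accumulators
theorem classify_one (v o : List String) (cb : List String × Bool) :
    classifyStep (v, o) cb =
      (v ++ (classifyStep ([], []) cb).1, o ++ (classifyStep ([], []) cb).2) := by
  obtain ⟨c, closed⟩ := cb
  simp only [classifyStep]; split_ifs <;> simp

theorem classify_shift (ch : List (List String × Bool)) :
    ∀ (v o : List String),
      ch.foldl classifyStep (v, o) =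
        (v ++ (ch.foldl classifyStep ([], [])).1, o ++ (ch.foldl classifyStep ([], [])).2) := by
  induction ch with
  | nil => intro v o; simp
  | cons cb rest ih =>
    intro v o
    simp only [List.foldl_cons]
    rw [classify_one v o cb, classify_one [] [] cb, List.nil_append, List.nil_append]
    rw [ih, ih ((classifyStep ([], []) cb).1)]
    simp

-- folding classifyStep through a leading closed chunk
theorem classify_cons_closed (c0 : String) (cr : List String)
    (X : List (List String × Bool)) :
    ((c0 :: cr, true) :: X).foldl classifyStep ([], []) =
      ((if PySem.Str.startswith c0 "V: " = true then
          [PySem.Str.replace (PySem.Str.join " " (c0 :: cr)) "V: " ""] else []) ++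
        (X.foldl classifyStep ([], [])).1,
       (if PySem.Str.startswith c0 "V: " = true then []
        else [PySem.Str.replace (PySem.Str.join " " (c0 :: cr)) "ARG1: " ""]) ++
        (X.foldl classifyStep ([], [])).2) := by
  by_cases hv : PySem.Str.startswith c0 "V: " = true <;>
  · simp only [List.foldl_cons, classifyStep, hv, if_pos, if_neg, not_false_iff,
      List.headD_cons, Bool.false_eq_true, List.nil_append]
    rw [classify_shift]
    simp

-- a dangling chunk is never the empty list
theorem bStep_ne_nil (l : List (String × String)) :
    ∀ (chunks : List (List String × Bool)) (cur : Option (List String)),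
      cur ≠ some [] → (l.foldl bStep (chunks, cur)).2 ≠ some [] := by
  induction l with
  | nil => intro chunks cur h; simpa using h
  | cons p rest ih =>
    intro chunks cur h
    obtain ⟨token, tag⟩ := p
    simp only [List.foldl_cons]
    by_cases hI : tag = "I-V" ∨ tag = "I-ARG1"
    · rw [bStep_I chunks cur token tag hI]
      exact ih _ _ (by simp)
    · rw [bStep_else chunks cur token tag hI]
      split_ifs <;> exact ih _ _ (by simp)

-- the loop invariant: A's state is the image of B's pass-1 state
theorem main_loop (l : List (String × String)) :
    ∀ (cur : Option (List String)) (frame v o : List String), cur ≠ some [] →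
      l.foldl aStep (frame, cur.getD [], v, o) =
        (frame ++ (l.foldl bStep ([], cur)).1.map (fun cb => bracketChunk cb.1),
         ((l.foldl bStep ([], cur)).2).getD [],
         v ++ ((l.foldl bStep ([], cur)).1.foldl classifyStep ([], [])).1,
         o ++ ((l.foldl bStep ([], cur)).1.foldl classifyStep ([], [])).2) := by
  induction l with
  | nil => intro cur frame v o h; simp
  | cons p rest ih =>
    intro cur frame v o h
    obtain ⟨token, tag⟩ := p
    simp only [List.foldl_cons]
    by_cases hI : tag = "I-V" ∨ tag = "I-ARG1"
    · rw [aStep_I frame (cur.getD []) v o token tag hI, bStep_I [] cur token tag hI]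
      have hih := ih (some (cur.getD [] ++ [token])) frame v o (by simp)
      simp only [Option.getD_some] at hih
      exact hih
    · cases cur with
      | none =>
        simp only [Option.getD_none]
        rw [aStep_nil frame v o token tag hI, bStep_else [] none token tag hI]
        by_cases hB : tag = "B-V" ∨ tag = "B-ARG1"
        · rw [if_pos hB, if_pos hB]
          have hih := ih (some [PySem.Str.slice tag (some 2) none ++ ": " ++ token])
            frame v o (by simp)
          simp only [Option.getD_some] at hih
          simpa using hih
        · rw [if_neg hB, if_neg hB]
          have hih := ih none frame v o (by simp)
          simp only [Option.getD_none] at hih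
          simpa using hih
      | some c =>
        match c, h with
        | c0 :: cr, _ =>
          rw [show (some (c0 :: cr)).getD [] = c0 :: cr from rfl]
          rw [aStep_cons frame v o c0 cr token tag hI,
            bStep_else [] (some (c0 :: cr)) token tag hI]
          rw [show ((match some (c0 :: cr) with
              | none => [] | some c => [(c, true)]) : List (List String × Bool)) =
            [(c0 :: cr, true)] from rfl, List.nil_append]
          by_cases hB : tag = "B-V" ∨ tag = "B-ARG1"
          · rw [if_pos hB, if_pos hB]
            rw [bStep_shift rest [(c0 :: cr, true)]]
            have hih := ih (some [PySem.Str.slice tag (some 2) none ++ ": " ++ token])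
              (frame ++ ["[" ++ PySem.Str.join " " (c0 :: cr) ++ "]"])
              (if PySem.Str.startswith c0 "V: " = true then
                verbUpd c0 cr v else v)
              (if PySem.Str.startswith c0 "V: " = true then o else objUpd c0 cr o)
              (by simp)
            simp only [Option.getD_some, verbUpd, objUpd] at hih
            rw [hih]
            simp only [List.singleton_append, List.map_cons]
            simp only [classify_cons_closed]
            by_cases hv : PySem.Str.startswith c0 "V: " = true
            · simp only [if_pos hv]; simp [bracketChunk]
            · simp only [if_neg hv]; simp [bracketChunk]
          · rw [if_neg hB, if_neg hB]
            rw [bStep_shift rest [(c0 :: cr, true)]]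
            have hih := ih none
              (frame ++ ["[" ++ PySem.Str.join " " (c0 :: cr) ++ "]"])
              (if PySem.Str.startswith c0 "V: " = true then
                verbUpd c0 cr v else v)
              (if PySem.Str.startswith c0 "V: " = true then o else objUpd c0 cr o)
              (by simp)
            simp only [Option.getD_none, verbUpd, objUpd] at hih
            rw [hih]
            simp only [List.singleton_append, List.map_cons]
            simp only [classify_cons_closed]
            by_cases hv : PySem.Str.startswith c0 "V: " = true
            · simp only [if_pos hv]; simp [bracketChunk]
            · simp only [if_neg hv]; simp [bracketChunk]

-- dangling chunks do not contribute to verb/obj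
theorem classify_append_open (ch : List (List String × Bool)) (c : List String)
    (acc : List String × List String) :
    (ch ++ [(c, false)]).foldl classifyStep acc = ch.foldl classifyStep acc := by
  rw [List.foldl_append]; simp [classifyStep]

-- ===== VERDICT (by name: the statement is the Claim_ definition above) =====
theorem tuple_from_IE_res_v3_spec : Claim_equal_tuple_from_IE_res_v3 := by
  intro tokens tags _
  unfold Spec_tuple_from_IE_res_v3 tuple_from_IE_res_v3 tuple_from_IE_res_v3_alt
  have hm := main_loop (tokens.zip tags) none [] [] [] (by simp)
  have hne := bStep_ne_nil (tokens.zip tags) [] none (by simp)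
  simp only [Option.getD_none, List.nil_append] at hm
  rw [hm]
  cases h2 : ((tokens.zip tags).foldl bStep ([], none)).2 with
  | none => simp [h2, bracketChunk]
  | some c =>
    match c, (h2 ▸ hne) with
    | c0 :: cr, _ =>
      simp only [h2, Option.getD_some]
      rw [classify_append_open]
      simp [bracketChunk]
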